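-- pv_equiv track=rewrite | github.com/EndyLab/FreeGenes | pipeline/freegenes_functions.py | suffix_genbank
-- ===== SOURCE A (Python) =====
-- def suffix_genbank(sequence):
--     multiline = "ORIGIN\n"
--     start_site = 1
--     sequence_list = [sequence[i:i+10] for i in range(0, len(sequence), 10)]
--     sequence_split_list = [sequence_list[i:i+6] for i in range(0, len(sequence_list), 6)]
--     for index in sequence_split_list:
--         multiline += str(start_site).rjust(9)
--         for sequence in index:
--             multiline += " " + sequence
--         multiline += "\n"
--         start_site = start_site + 60
--     multiline += '//'
--     return multiline
-- ===== SOURCE B (Python) =====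
-- def suffix_genbank(sequence):
--     pieces = ["ORIGIN"]
--     for i, base in enumerate(sequence):
--         if i % 60 == 0:
--             pieces.append("\n" + str(i + 1).rjust(9))
--         if i % 10 == 0:
--             pieces.append(" ")
--         pieces.append(base)
--     pieces.append("\n//")
--     return "".join(pieces)
-- ===== Notes on version B (the rewrite author's own statement) =====
-- stated objective: alternative
-- what changed: B never slices the sequence into chunks at all: it streams character by character, emitting a newline+right-justified label whenever the index is a multiple of 60 and a space whenever it is a multiple of 10, then the character; A instead pre-builds two nested chunk lists (10-base slices, then groups of six) and walks them with a running start_site accumulator.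
import Mathlib
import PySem

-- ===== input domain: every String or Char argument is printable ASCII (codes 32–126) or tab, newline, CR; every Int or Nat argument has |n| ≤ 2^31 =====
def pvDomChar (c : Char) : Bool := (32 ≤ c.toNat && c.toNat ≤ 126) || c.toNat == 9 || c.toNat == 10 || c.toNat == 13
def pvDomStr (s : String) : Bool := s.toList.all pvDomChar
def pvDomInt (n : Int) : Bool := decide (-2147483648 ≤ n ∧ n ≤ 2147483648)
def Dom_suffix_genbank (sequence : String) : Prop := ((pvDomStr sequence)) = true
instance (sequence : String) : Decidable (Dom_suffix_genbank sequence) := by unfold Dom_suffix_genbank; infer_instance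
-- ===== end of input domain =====

-- B streams the sequence character by character, emitting a newline + right-justified label
-- at every index divisible by 60 and a space at every index divisible by 10, with no chunk
-- slicing at all; A pre-builds nested chunk lists with a running start_site (objective: alternative).

-- exact port of str.rjust(9) with the default space fill (pad on the left to width 9)
def pvRjust9 (cs : List Char) : List Char := List.replicate (9 - cs.length) ' ' ++ cs

-- ===== PORT A =====
def suffix_genbank (sequence : String) : String :=
  let s := sequence.toList
  let sequence_list := (PySem.List.pyRange 0 (PySem.Chars.len s) 10).map
      (fun i => PySem.List.slice s (some i) (some (i + 10)))
  let sequence_split_list := (PySem.List.pyRange 0 (sequence_list.length : Int) 6).map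
      (fun i => PySem.List.slice sequence_list (some i) (some (i + 6)))
  let r := sequence_split_list.foldl
      (fun (st : List Char × Int) idx =>
        let m := st.1 ++ pvRjust9 (PySem.Int.toChars st.2)
        let m := idx.foldl (fun m c => m ++ ([' '] ++ c)) m
        (m ++ ['\n'], st.2 + 60))
      ("ORIGIN\n".toList, 1)
  String.ofList (r.1 ++ ['/', '/'])

-- ===== PORT B =====
-- enumerate indices are ≥ 0, where Lean's Int % and Python's % agree.
def suffix_genbank_alt (sequence : String) : String :=
  let s := sequence.toList
  let pieces := (PySem.List.enumerate s).foldl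
      (fun (out : List Char) (p : Int × Char) =>
        let out := if p.1 % 60 = 0 then out ++ ('\n' :: pvRjust9 (PySem.Int.toChars (p.1 + 1))) else out
        let out := if p.1 % 10 = 0 then out ++ [' '] else out
        out ++ [p.2])
      "ORIGIN".toList
  String.ofList (pieces ++ "\n//".toList)

-- ===== PRECONDITION & SPEC =====
def Spec_suffix_genbank (sequence : String) (out : String) : Prop := out = suffix_genbank_alt sequence
instance (sequence : String) (out : String) : Decidable (Spec_suffix_genbank sequence out) := by unfold Spec_suffix_genbank; infer_instance

-- ===== CLAIM (what is proved, stated in full; the proofs are below) =====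
def Claim_equal_suffix_genbank : Prop := ∀ (sequence : String), Dom_suffix_genbank sequence → Spec_suffix_genbank sequence (suffix_genbank sequence)

-- ===== LEMMAS AND PROOFS =====

def pvLine (site : Int) (grp : List (List Char)) : List Char :=
  pvRjust9 (PySem.Int.toChars site) ++ grp.flatMap (fun c => [' '] ++ c)

def pvLines : List (List (List Char)) → Int → List (List Char)
  | [], _ => []
  | g :: t, site => (pvLine site g ++ ['\n']) :: pvLines t (site + 60)

def pvChunks10 : List Char → List (List Char)
  | [] => []
  | c :: t => ((c :: t).take 10) :: pvChunks10 ((c :: t).drop 10)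
termination_by cs => cs.length
decreasing_by simp

def pvLinesA : List Char → Int → List Char
  | [], _ => []
  | c :: t, site =>
      (pvLine site (pvChunks10 ((c :: t).take 60)) ++ ['\n']) ++ pvLinesA ((c :: t).drop 60) (site + 60)
termination_by cs _ => cs.length
decreasing_by simp

def pvLinesB : List Char → Int → List Char
  | [], _ => []
  | c :: t, n =>
      ('\n' :: pvLine (n + 1) (pvChunks10 ((c :: t).take 60))) ++ pvLinesB ((c :: t).drop 60) (n + 60)
termination_by cs _ => cs.length
decreasing_by simp


@[simp] lemma pvChunks10_nil : pvChunks10 [] = [] := by rw [pvChunks10.eq_1]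
lemma pvChunks10_cons (c : Char) (t : List Char) :
    pvChunks10 (c :: t) = ((c :: t).take 10) :: pvChunks10 ((c :: t).drop 10) := by rw [pvChunks10.eq_2]
@[simp] lemma pvLinesA_nil (site : Int) : pvLinesA [] site = [] := by rw [pvLinesA.eq_1]
lemma pvLinesA_cons (c : Char) (t : List Char) (site : Int) :
    pvLinesA (c :: t) site
      = (pvLine site (pvChunks10 ((c :: t).take 60)) ++ ['\n']) ++ pvLinesA ((c :: t).drop 60) (site + 60) := by
  rw [pvLinesA.eq_2]
@[simp] lemma pvLinesB_nil (n : Int) : pvLinesB [] n = [] := by rw [pvLinesB.eq_1]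
lemma pvLinesB_cons (c : Char) (t : List Char) (n : Int) :
    pvLinesB (c :: t) n
      = ('\n' :: pvLine (n + 1) (pvChunks10 ((c :: t).take 60))) ++ pvLinesB ((c :: t).drop 60) (n + 60) := by
  rw [pvLinesB.eq_2]

-- the per-character emission of B's loop body
def pvPiece (p : Int × Char) : List Char :=
  (if p.1 % 60 = 0 then '\n' :: pvRjust9 (PySem.Int.toChars (p.1 + 1)) else []) ++
  (if p.1 % 10 = 0 then [' '] else []) ++ [p.2]

def pvMid (p : Int × Char) : List Char :=
  (if p.1 % 10 = 0 then [' '] else []) ++ [p.2]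

lemma foldB_eq (l : List (Int × Char)) (acc : List Char) :
    l.foldl
      (fun (out : List Char) (p : Int × Char) =>
        (if p.1 % 10 = 0 then
            (if p.1 % 60 = 0 then out ++ ('\n' :: pvRjust9 (PySem.Int.toChars (p.1 + 1))) else out) ++ [' ']
          else
            (if p.1 % 60 = 0 then out ++ ('\n' :: pvRjust9 (PySem.Int.toChars (p.1 + 1))) else out)) ++ [p.2])
      acc = acc ++ l.flatMap pvPiece := by
  have h : (fun (out : List Char) (p : Int × Char) =>
        (if p.1 % 10 = 0 then
            (if p.1 % 60 = 0 then out ++ ('\n' :: pvRjust9 (PySem.Int.toChars (p.1 + 1))) else out) ++ [' ']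
          else
            (if p.1 % 60 = 0 then out ++ ('\n' :: pvRjust9 (PySem.Int.toChars (p.1 + 1))) else out)) ++ [p.2])
      = fun out p => out ++ pvPiece p := by
    funext out p
    unfold pvPiece
    split_ifs <;> simp
  rw [h, PySem.List.foldl_append_eq_flatMap]

lemma plain_stream (u : List Char) (m : Int)
    (h : ∀ j : Nat, j < u.length → (m + j) % 10 ≠ 0) :
    (PySem.List.enumerate u m).flatMap pvMid = u := by
  induction u generalizing m with
  | nil => simp [PySem.List.enumerate_nil]
  | cons c t ih =>
    rw [PySem.List.enumerate_cons, List.flatMap_cons]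
    have h0 : m % 10 ≠ 0 := by simpa using h 0 (by simp)
    rw [ih (m + 1) (fun j hj => by
      have := h (j + 1) (by simpa using Nat.succ_lt_succ hj)
      push_cast at this ⊢
      omega)]
    simp [pvMid, h0]

lemma chunk_stream (t : List Char) (m : Int) (hm : m % 10 = 0) :
    (PySem.List.enumerate t m).flatMap pvMid = (pvChunks10 t).flatMap (fun c => [' '] ++ c) := by
  generalize hL : t.length = L
  induction L using Nat.strong_induction_on generalizing t m with
  | _ L ih =>
    cases t with
    | nil => simp [PySem.List.enumerate_nil]
    | cons c u =>
      rw [PySem.List.enumerate_cons, List.flatMap_cons]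
      have hc : pvMid (m, c) = [' ', c] := by simp [pvMid, hm]
      by_cases h9 : u.length ≤ 9
      · have hdrop : u.drop 9 = [] := by simp [List.drop_eq_nil_iff]; omega
        have htake : u.take 10 = u := List.take_of_length_le (by omega)
        rw [plain_stream u (m + 1) (fun j hj => by omega)]
        show pvMid (m, c) ++ u = (pvChunks10 (c :: u)).flatMap (fun c => [' '] ++ c)
        rw [pvChunks10_cons]
        have hdrop10 : (c :: u).drop 10 = [] := by simp [List.drop_eq_nil_iff]; omega
        simp [hc, hdrop10, List.take_of_length_le (show (c :: u).length ≤ 10 by simp; omega)]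
      · conv_lhs => rw [show u = u.take 9 ++ u.drop 9 from (List.take_append_drop 9 u).symm]
        rw [PySem.List.enumerate_append, List.flatMap_append]
        have hlen9 : (u.take 9).length = 9 := by simp; omega
        rw [plain_stream (u.take 9) (m + 1) (fun j hj => by
          rw [hlen9] at hj; omega)]
        rw [hlen9]
        have hoff : m + 1 + ((9 : Nat) : Int) = m + 10 := by push_cast; ring
        rw [hoff]
        have hrec := ih ((u.drop 9).length) (by simp [← hL]) (u.drop 9)
          (m + 10) (by omega) rfl
        rw [hrec]
        show pvMid (m, c) ++ _ = (pvChunks10 (c :: u)).flatMap (fun c => [' '] ++ c)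
        rw [pvChunks10_cons, List.flatMap_cons]
        have ht10 : (c :: u).take 10 = c :: u.take 9 := by simp
        have hd10 : (c :: u).drop 10 = u.drop 9 := by simp
        rw [ht10, hd10, hc]
        simp

lemma mid_stream (t : List Char) (m : Int)
    (h : ∀ j : Nat, j < t.length → (m + j) % 60 ≠ 0) :
    (PySem.List.enumerate t m).flatMap pvPiece = (PySem.List.enumerate t m).flatMap pvMid := by
  induction t generalizing m with
  | nil => simp [PySem.List.enumerate_nil]
  | cons c u ih =>
    rw [PySem.List.enumerate_cons, List.flatMap_cons, List.flatMap_cons]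
    have h0 : m % 60 ≠ 0 := by simpa using h 0 (by simp)
    rw [ih (m + 1) (fun j hj => by
      have := h (j + 1) (by simpa using Nat.succ_lt_succ hj)
      push_cast at this ⊢
      omega)]
    simp [pvPiece, pvMid, h0]

lemma stream_eq_linesB (s : List Char) (n : Int) (hn : n % 60 = 0) :
    (PySem.List.enumerate s n).flatMap pvPiece = pvLinesB s n := by
  generalize hL : s.length = L
  induction L using Nat.strong_induction_on generalizing s n with
  | _ L ih =>
    cases s with
    | nil => simp [PySem.List.enumerate_nil]
    | cons c t =>
      rw [PySem.List.enumerate_cons, List.flatMap_cons]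
      have hn10 : n % 10 = 0 := by omega
      have hp : pvPiece (n, c) = '\n' :: pvRjust9 (PySem.Int.toChars (n + 1)) ++ pvMid (n, c) := by
        simp [pvPiece, pvMid, hn, hn10]
      conv_lhs => rw [show t = t.take 59 ++ t.drop 59 from (List.take_append_drop 59 t).symm]
      rw [PySem.List.enumerate_append, List.flatMap_append]
      rw [mid_stream (t.take 59) (n + 1) (fun j hj => by
        simp at hj; omega)]
      have hchunk : pvMid (n, c) ++ (PySem.List.enumerate (t.take 59) (n + 1)).flatMap pvMid
          = (pvChunks10 (c :: t.take 59)).flatMap (fun c => [' '] ++ c) := by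
        have := chunk_stream (c :: t.take 59) n hn10
        rw [PySem.List.enumerate_cons, List.flatMap_cons] at this
        exact this
      have ht60 : (c :: t).take 60 = c :: t.take 59 := by simp
      have hd60 : (c :: t).drop 60 = t.drop 59 := by simp
      rw [pvLinesB_cons, ht60, hd60]
      by_cases h59 : t.length ≤ 59
      · have hdrop : t.drop 59 = [] := by simp [List.drop_eq_nil_iff]; omega
        rw [hdrop]
        simp only [PySem.List.enumerate_nil, List.flatMap_nil, pvLinesB, List.append_nil]
        rw [hp, pvLine]
        simp [hchunk]
      · have hlen59 : (t.take 59).length = 59 := by simp; omega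
        rw [hlen59]
        have hoff : n + 1 + ((59 : Nat) : Int) = n + 60 := by push_cast; ring
        rw [hoff]
        have hrec := ih ((t.drop 59).length) (by simp [← hL]) (t.drop 59)
          (n + 60) (by omega) rfl
        rw [hrec, hp, pvLine]
        have h2 : pvMid (n, c) ++ ((PySem.List.enumerate (t.take 59) (n + 1)).flatMap pvMid
            ++ pvLinesB (t.drop 59) (n + 60))
            = (pvChunks10 (c :: t.take 59)).flatMap (fun c => [' '] ++ c) ++ pvLinesB (t.drop 59) (n + 60) := by
          rw [← List.append_assoc, hchunk]
        simp only [List.cons_append, List.append_assoc, List.nil_append] at h2 ⊢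
        rw [h2]

lemma linesB_shift (s : List Char) (n : Int) :
    pvLinesB s n ++ ['\n'] = '\n' :: pvLinesA s (n + 1) := by
  generalize hL : s.length = L
  induction L using Nat.strong_induction_on generalizing s n with
  | _ L ih =>
    cases s with
    | nil => simp
    | cons c t =>
      rw [pvLinesB_cons, pvLinesA_cons]
      have hrec := ih (((c :: t).drop 60).length) (by rw [← hL]; simp)
        ((c :: t).drop 60) (n + 60) rfl
      have hstep : n + 60 + 1 = n + 1 + 60 := by ring
      rw [List.append_assoc, hrec, hstep]
      simp

-- A-side reduction (the fold over nested chunk lists)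
lemma foldA_eq (l : List (List (List Char))) (acc : List Char) (site : Int) :
    l.foldl (fun (st : List Char × Int) idx =>
        (idx.foldl (fun m c => m ++ ([' '] ++ c)) (st.1 ++ pvRjust9 (PySem.Int.toChars st.2)) ++ ['\n'], st.2 + 60))
      (acc, site)
    = (acc ++ (pvLines l site).flatten, site + 60 * l.length) := by
  induction l generalizing acc site with
  | nil => simp [pvLines]
  | cons g t ih =>
    rw [List.foldl_cons]
    show (List.foldl _ (_, site + 60) t) = _
    rw [ih]
    simp only [PySem.List.foldl_append_eq_flatMap, pvLines, List.flatten_cons,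
      List.length_cons, pvLine]
    refine Prod.ext ?_ ?_
    · simp
    · simp; ring

lemma pvLines_map_range (c : Nat) (F : Nat → List (List Char)) (site : Int) :
    pvLines ((List.range c).map F) site
      = (List.range c).map (fun (k : Nat) => pvLine (site + 60 * (k : Int)) (F k) ++ ['\n']) := by
  induction c generalizing F site with
  | zero => simp [pvLines]
  | succ c ih =>
    rw [List.range_succ_eq_map, List.map_cons, List.map_cons, List.map_map, List.map_map]
    simp only [pvLines, ih]
    refine congrArg₂ _ (by norm_num) ?_
    refine List.map_congr_left (fun k _ => ?_)
    show pvLine (site + 60 + 60 * (k : Int)) (F (k + 1)) ++ ['\n'] =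
      pvLine (site + 60 * ((k + 1 : Nat) : Int)) (F (k + 1)) ++ ['\n']
    congr 2
    push_cast; ring

lemma pymap_chunks {α : Type} (xs : List α) (c : Nat) (hc : 0 < c) :
    (PySem.List.pyRange 0 (xs.length : Int) (c : Int)).map
        (fun i => PySem.List.slice xs (some i) (some (i + (c : Int))))
      = (List.range ((xs.length + (c - 1)) / c)).map (fun j => (xs.drop (c * j)).take c) := by
  rw [PySem.List.pyRange_of_pos 0 (xs.length : Int) (by exact_mod_cast hc), List.map_map]
  have hcount : (if (0 : Int) < (xs.length : Int) then
        (((xs.length : Int) - 0 + (c : Int) - 1) / (c : Int)).toNat else 0)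
      = (xs.length + (c - 1)) / c := by
    split_ifs with h
    · have h1 : (xs.length : Int) - 0 + (c : Int) - 1 = ((xs.length + (c - 1) : Nat) : Int) := by
        push_cast [Nat.cast_sub (by omega : 1 ≤ c)]
        ring
      rw [h1, ← Int.natCast_ediv, Int.toNat_natCast]
    · have h0 : xs.length = 0 := by exact_mod_cast by omega
      rw [h0]
      exact (Nat.div_eq_of_lt (by omega)).symm
  rw [hcount]
  refine List.map_congr_left (fun j _ => ?_)
  show PySem.List.slice xs (some (0 + (c : Int) * (j : Int))) (some (0 + (c : Int) * (j : Int) + (c : Int))) = _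
  have h1 : (0 + (c : Int) * (j : Int)) = ((c * j : Nat) : Int) := by push_cast; ring
  rw [h1, show ((c * j : Nat) : Int) + (c : Int) = ((c * j : Nat) : Int) + ((c : Nat) : Int) from rfl,
    PySem.List.slice_natCast_add]

lemma window_chunks (s : List Char) (k : Nat) :
    (((List.range ((s.length + 9) / 10)).map (fun j => (s.drop (10 * j)).take 10)).drop (6 * k)).take 6
      = (List.range ((((s.drop (60 * k)).take 60).length + 9) / 10)).map
          (fun j => (((s.drop (60 * k)).take 60).drop (10 * j)).take 10) := by
  apply List.ext_getElem
  · simp only [List.length_take, List.length_drop, List.length_map, List.length_range]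
    omega
  · intro i h1 h2
    have hi : i < 6 := by
      simp only [List.length_take, List.length_drop, List.length_map, List.length_range] at h1
      omega
    simp only [List.getElem_take, List.getElem_drop, List.getElem_map, List.getElem_range]
    rw [List.drop_take, List.take_take, List.drop_drop]
    have e1 : min 10 (60 - 10 * i) = 10 := by omega
    have e2 : 60 * k + 10 * i = 10 * (6 * k + i) := by ring
    rw [e1, e2]

lemma chunks_eq (cs : List Char) :
    (List.range ((cs.length + 9) / 10)).map (fun j => (cs.drop (10 * j)).take 10) = pvChunks10 cs := by
  generalize hL : cs.length = L
  induction L using Nat.strong_induction_on generalizing cs with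
  | _ L ih =>
    cases cs with
    | nil => subst hL; norm_num
    | cons c t =>
      subst hL
      have hlen : (c :: t).length = t.length + 1 := by simp
      have hdlen : ((c :: t).drop 10).length = t.length + 1 - 10 := by simp
      have hcount : ((c :: t).length + 9) / 10 = (((c :: t).drop 10).length + 9) / 10 + 1 := by
        rw [hlen, hdlen]; omega
      rw [hcount, List.range_succ_eq_map, List.map_cons, List.map_map]
      rw [pvChunks10_cons]
      refine congrArg₂ _ (by simp) ?_
      rw [← ih (((c :: t).drop 10).length) (by simp only [List.length_drop, List.length_cons]; omega) _ rfl]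
      refine List.map_congr_left (fun j _ => ?_)
      show ((c :: t).drop (10 * (j + 1))).take 10 = (((c :: t).drop 10).drop (10 * j)).take 10
      rw [List.drop_drop]
      congr 1
      ring_nf

lemma lines_mapRange (s : List Char) (site : Int) :
    ((List.range ((s.length + 59) / 60)).map (fun (k : Nat) =>
        pvLine (site + 60 * (k : Int)) (pvChunks10 ((s.drop (60 * k)).take 60)) ++ ['\n'])).flatten
      = pvLinesA s site := by
  generalize hL : s.length = L
  induction L using Nat.strong_induction_on generalizing s site with
  | _ L ih =>
    cases s with
    | nil => subst hL; norm_num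
    | cons c t =>
      subst hL
      have hdlen : ((c :: t).drop 60).length = t.length + 1 - 60 := by simp
      have hcount : ((c :: t).length + 59) / 60 = (((c :: t).drop 60).length + 59) / 60 + 1 := by
        simp only [List.length_cons, hdlen]; omega
      rw [hcount, List.range_succ_eq_map, List.map_cons, List.map_map, List.flatten_cons]
      rw [pvLinesA_cons]
      refine congrArg₂ _ (by norm_num) ?_
      rw [← ih (((c :: t).drop 60).length) (by simp only [List.length_drop, List.length_cons]; omega) _ (site + 60) rfl]
      refine congrArg _ (List.map_congr_left (fun k _ => ?_))
      simp only [Function.comp_apply, Nat.succ_eq_add_one]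
      have e1 : site + 60 * ((k + 1 : Nat) : Int) = site + 60 + 60 * (k : Int) := by push_cast; ring
      have e2 : (c :: t).drop (60 * (k + 1)) = ((c :: t).drop 60).drop (60 * k) := by
        rw [List.drop_drop]; congr 1; ring
      rw [e1, e2]

lemma portA_form (sequence : String) :
    suffix_genbank sequence
      = String.ofList ("ORIGIN".toList ++ '\n' :: pvLinesA sequence.toList 1 ++ ['/', '/']) := by
  unfold suffix_genbank
  simp only [PySem.Chars.len]
  generalize sequence.toList = s
  have h10 := pymap_chunks s 10 (by norm_num)
  norm_num at h10
  rw [h10]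
  set chA := List.map (fun j => List.take 10 (List.drop (10 * j) s)) (List.range ((s.length + 9) / 10)) with hchA
  have h6 := pymap_chunks chA 6 (by norm_num)
  norm_num at h6
  rw [h6, foldA_eq, pvLines_map_range]
  have hL : chA.length = (s.length + 9) / 10 := by rw [hchA]; simp
  have hM : (chA.length + 5) / 6 = (s.length + 59) / 60 := by rw [hL]; omega
  rw [hM]
  have hmaps : (List.map (fun (k : Nat) => pvLine (1 + 60 * (k : Int)) (List.take 6 (List.drop (6 * k) chA)) ++ ['\n'])
        (List.range ((s.length + 59) / 60)))
      = (List.range ((s.length + 59) / 60)).map (fun (k : Nat) =>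
          pvLine ((1 : Int) + 60 * (k : Int)) (pvChunks10 ((s.drop (60 * k)).take 60)) ++ ['\n']) := by
    refine List.map_congr_left (fun k _ => ?_)
    rw [hchA, window_chunks, chunks_eq]
  rw [hmaps, lines_mapRange s 1]
  have hO : "ORIGIN\n".toList = "ORIGIN".toList ++ ['\n'] := by decide
  rw [hO]
  simp

lemma ports_agree (sequence : String) : suffix_genbank sequence = suffix_genbank_alt sequence := by
  rw [portA_form]
  unfold suffix_genbank_alt
  simp only []
  rw [foldB_eq, stream_eq_linesB sequence.toList 0 (by decide)]
  have hT : "\n//".toList = ['\n'] ++ ['/', '/'] := by decide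
  refine congrArg String.ofList ?_
  have h := linesB_shift sequence.toList 0
  rw [show (0 : Int) + 1 = 1 from by norm_num] at h
  rw [hT, List.append_assoc, List.append_assoc,
      ← List.append_assoc (pvLinesB sequence.toList 0), h]

-- ===== VERDICT (by name: the statement is the Claim_ definition above) =====
theorem suffix_genbank_spec : Claim_equal_suffix_genbank :=
  fun sequence _ => ports_agree sequence
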